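-- pv_equiv track=rewrite | github.com/matthewmuccio/InterviewPrepKit | saq4.py | scan_left
-- ===== SOURCE A (Python) =====
-- def scan_left(arr):
--     n = len(arr)
--     stack = []
--     left = [0] * n
--     for i in range(n - 1, -1, -1):
--         while stack and arr[i] <= arr[stack[-1]]:
--             top = stack.pop()
--             left[top] = top - i - 1
--         stack.append(i)
--     i -= 1
--     while stack:
--         top = stack.pop()
--         left[top] = top - i - 1
--     return left
-- ===== SOURCE B (Python) =====
-- def scan_left(arr):
--     left = []
--     for i in range(len(arr)):
--         k = 0
--         while k < i and arr[i - 1 - k] > arr[i]: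
--             k += 1
--         left.append(k)
--     return left
-- ===== Notes on version B (the rewrite author's own statement) =====
-- stated objective: simpler
-- what changed: Replaces the right-to-left monotonic-stack pass (with a deferred drain that patches remaining entries) by a single left-to-right loop that counts the consecutive strictly-greater elements directly with a backward scan per index.
import Mathlib
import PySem

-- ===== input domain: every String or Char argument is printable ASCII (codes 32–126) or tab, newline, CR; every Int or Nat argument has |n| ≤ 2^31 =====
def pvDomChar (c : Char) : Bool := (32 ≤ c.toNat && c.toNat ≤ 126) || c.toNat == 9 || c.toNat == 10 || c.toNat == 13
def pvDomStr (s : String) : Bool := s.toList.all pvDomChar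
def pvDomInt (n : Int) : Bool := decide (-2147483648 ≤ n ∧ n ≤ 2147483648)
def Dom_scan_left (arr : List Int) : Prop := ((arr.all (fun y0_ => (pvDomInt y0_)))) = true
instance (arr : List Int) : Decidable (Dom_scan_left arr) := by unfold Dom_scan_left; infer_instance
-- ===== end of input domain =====

-- B replaces A's right-to-left monotonic-stack pass by a plain left-to-right loop with a
-- direct backward scan per index (simpler, not faster); on [] A raises, B returns [].


-- ===== PORT A =====
-- inner while: pop while stack nonempty and arr[i] <= arr[stack[-1]]; stack head = Python stack top
def scanPops (arr : List Int) (i : Int) : List Int → List Int → List Int × List Int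
  | [], left => ([], left)
  | t :: rest, left =>
    if PySem.List.pyGetD arr i 0 ≤ PySem.List.pyGetD arr t 0 then
      scanPops arr i rest (PySem.List.pySetD left t (t - i - 1))
    else (t :: rest, left)

-- final while: pop everything, left[top] = top - i - 1
def scanDrain (i : Int) : List Int → List Int → List Int
  | [], left => left
  | t :: rest, left => scanDrain i rest (PySem.List.pySetD left t (t - i - 1))

-- indices produced by range(n-1,-1,-1) are always in range, so pyGetD/pySetD are exact here;
-- after the for loop i = 0 (Pre_ gives n ≥ 1; on [] Python raises UnboundLocalError), then i -= 1
def scan_left (arr : List Int) : List Int :=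
  let n := arr.length
  let s := (PySem.List.pyRange ((n : Int) - 1) (-1) (-1)).foldl
      (fun (s : List Int × List Int) i =>
        let p := scanPops arr i s.1 s.2
        (i :: p.1, p.2))
      ([], List.replicate n (0 : Int))
  scanDrain (0 - 1) s.1 s.2

-- ===== PORT B =====
-- while k < i and arr[i-1-k] > arr[i]: k += 1
def altWhile (arr : List Int) (ai : Int) (i : Nat) (k : Nat) : Nat :=
  if k < i ∧ ai < PySem.List.pyGetD arr ((i : Int) - 1 - k) 0 then
    altWhile arr ai i (k + 1)
  else k
termination_by i - k

def scan_left_alt (arr : List Int) : List Int :=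
  (PySem.List.pyRange 0 (arr.length : Int) 1).foldl
    (fun left i => left ++ [(altWhile arr (PySem.List.pyGetD arr i 0) i.toNat 0 : Int)])
    []

-- ===== PRECONDITION & SPEC =====
-- Pre_ excludes only the empty list, on which Python A raises UnboundLocalError ('i -= 1' before i is bound); B returns [] there.
def Pre_scan_left (arr : List Int) : Prop := arr ≠ []
instance (arr : List Int) : Decidable (Pre_scan_left arr) := by unfold Pre_scan_left; infer_instance
def pvWitness_scan_left : List Int := [3, 1, 2]

def Spec_scan_left (arr : List Int) (out : List Int) : Prop := out = scan_left_alt arr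
instance (arr : List Int) (out : List Int) : Decidable (Spec_scan_left arr out) := by unfold Spec_scan_left; infer_instance

-- ===== CLAIM (what is proved, stated in full; the proofs are below) =====
def Claim_equal_scan_left : Prop := ∀ (arr : List Int), Dom_scan_left arr → Pre_scan_left arr → Spec_scan_left arr (scan_left arr)

-- ===== LEMMAS AND PROOFS =====

-- run length: number of trailing elements of the first j entries that are > v
def runLen (arr : List Int) (v : Int) : Nat → Nat
  | 0 => 0
  | j + 1 => if v < arr.getD j 0 then runLen arr v j + 1 else 0

def rLen (arr : List Int) (j : Nat) : Nat := runLen arr (arr.getD j 0) j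

-- what the left array holds at stage lo (entries ≥ lo already popped carry their run length)
def leftSpec (arr : List Int) (lo t : Nat) : Int :=
  if lo ≤ t ∧ rLen arr t < t - lo then (rLen arr t : Int) else 0

-- the stack at stage lo: ascending indices whose run reaches down to lo
def stkN (arr : List Int) (lo k : Nat) : List Nat :=
  (List.range' lo k).filter (fun j => decide (j - lo ≤ rLen arr j))

lemma runLen_le (arr : List Int) (v : Int) : ∀ j, runLen arr v j ≤ j := by
  intro j; induction j with
  | zero => simp [runLen]
  | succ j ih => simp only [runLen]; split <;> omega

lemma runLen_gt (arr : List Int) (v : Int) :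
    ∀ j m, j - runLen arr v j ≤ m → m < j → v < arr.getD m 0 := by
  intro j; induction j with
  | zero => omega
  | succ j ih =>
    intro m h1 h2
    simp only [runLen] at h1
    by_cases hlt : v < arr.getD j 0
    · rw [if_pos hlt] at h1
      rcases Nat.lt_succ_iff_lt_or_eq.mp h2 with h | h
      · exact ih m (by have := runLen_le arr v j; omega) h
      · exact h ▸ hlt
    · rw [if_neg hlt] at h1; omega

lemma runLen_stop (arr : List Int) (v : Int) :
    ∀ j, runLen arr v j < j → arr.getD (j - runLen arr v j - 1) 0 ≤ v := by
  intro j; induction j with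
  | zero => omega
  | succ j ih =>
    intro h
    simp only [runLen] at h ⊢
    by_cases hlt : v < arr.getD j 0
    · rw [if_pos hlt] at h ⊢
      have h' : runLen arr v j < j := by omega
      have heq : j + 1 - (runLen arr v j + 1) - 1 = j - runLen arr v j - 1 := by omega
      rw [heq]; exact ih h'
    · rw [if_neg hlt] at h ⊢
      have heq : j + 1 - 0 - 1 = j := by omega
      rw [heq]; exact le_of_not_gt hlt

-- rLen-phrased corollaries (so omega sees one atom)
lemma rLen_gt (arr : List Int) {j m : Nat} (h1 : j - rLen arr j ≤ m) (h2 : m < j) :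
    arr.getD j 0 < arr.getD m 0 := runLen_gt arr (arr.getD j 0) j m h1 h2

lemma rLen_stop (arr : List Int) {j : Nat} (h : rLen arr j < j) :
    arr.getD (j - rLen arr j - 1) 0 ≤ arr.getD j 0 := runLen_stop arr (arr.getD j 0) j h

-- keep/pop characterisation at the next stage
lemma keep_iff (arr : List Int) (lo j : Nat) (h1 : 1 ≤ lo) (hj : lo ≤ j) :
    (j - (lo - 1) ≤ rLen arr j) ↔ (j - lo ≤ rLen arr j ∧ arr.getD j 0 < arr.getD (lo - 1) 0) := by
  constructor
  · intro h
    refine ⟨by omega, ?_⟩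
    exact rLen_gt arr (by omega) (by omega)
  · rintro ⟨hc, hv⟩
    by_contra hn
    have hr : rLen arr j = j - lo := by omega
    have hlt : rLen arr j < j := by omega
    have hb := rLen_stop arr hlt
    rw [show j - rLen arr j - 1 = lo - 1 by omega] at hb
    exact absurd hv (not_lt.mpr hb)

lemma pop_r (arr : List Int) (lo j : Nat) (h1 : 1 ≤ lo) (hj : lo ≤ j)
    (hc : j - lo ≤ rLen arr j) (hp : arr.getD (lo - 1) 0 ≤ arr.getD j 0) :
    rLen arr j = j - lo := by
  by_contra hne
  have h2 : j - (lo - 1) ≤ rLen arr j := by omega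
  have := ((keep_iff arr lo j h1 hj).mp h2).2
  omega

-- strengthen a Pairwise using a membership predicate
lemma pairwise_rel_of_mem {α : Type} {C : α → Prop} {R S : α → α → Prop} :
    ∀ (l : List α), l.Pairwise S → (∀ x ∈ l, C x) →
      (∀ p q, C p → C q → S p q → R p q) → l.Pairwise R := by
  intro l hp hm himp
  induction l with
  | nil => exact List.Pairwise.nil
  | cons x xs ih =>
    rcases List.pairwise_cons.mp hp with ⟨hx, hxs⟩
    exact List.Pairwise.cons
      (fun y hy => himp x y (hm x (List.mem_cons_self)) (hm y (List.mem_cons_of_mem _ hy)) (hx y hy))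
      (ih hxs (fun y hy => hm y (List.mem_cons_of_mem _ hy)))

-- the inner while loop, on a value-decreasing stack of Nat indices
lemma scanPops_eq (arr : List Int) (x : Nat) :
    ∀ (sl : List Nat) (L : List Int),
      sl.Pairwise (fun p q => arr.getD q 0 < arr.getD p 0) →
      scanPops arr (x : Int) (sl.map (fun j : Nat => (j : Int))) L =
        ((sl.filter (fun t => decide (arr.getD t 0 < arr.getD x 0))).map (fun j : Nat => (j : Int)),
         (sl.filter (fun t => decide (arr.getD x 0 ≤ arr.getD t 0))).foldl
           (fun L t => L.set t ((t : Int) - x - 1)) L) := by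
  intro sl
  induction sl with
  | nil => intro L _; simp [scanPops]
  | cons t rest ih =>
    intro L hp
    rcases List.pairwise_cons.mp hp with ⟨ht, hrest⟩
    by_cases h : arr.getD x 0 ≤ arr.getD t 0
    · simp only [List.map_cons, scanPops, PySem.List.pyGetD_natCast, if_pos h,
        PySem.List.pySetD_natCast]
      rw [ih _ hrest]
      have h1 : (decide (arr.getD t 0 < arr.getD x 0)) = false := decide_eq_false (by omega)
      have h2 : (decide (arr.getD x 0 ≤ arr.getD t 0)) = true := decide_eq_true h
      rw [List.filter_cons, List.filter_cons, h1, h2]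
      simp
    · simp only [List.map_cons, scanPops, PySem.List.pyGetD_natCast, if_neg h]
      have hkeep : ∀ q ∈ rest, (decide (arr.getD q 0 < arr.getD x 0)) = true := by
        intro q hq; exact decide_eq_true (by have := ht q hq; omega)
      have hdrop : ∀ q ∈ rest, ¬ ((decide (arr.getD x 0 ≤ arr.getD q 0)) = true) := by
        intro q hq; simp only [decide_eq_true_eq]; have := ht q hq; omega
      rw [List.filter_cons, List.filter_cons]
      have h1 : (decide (arr.getD t 0 < arr.getD x 0)) = true := decide_eq_true (by omega)
      have h2 : (decide (arr.getD x 0 ≤ arr.getD t 0)) = false := decide_eq_false (by omega)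
      simp only [h1, h2, if_pos, Bool.false_eq_true, if_neg, reduceCtorEq]
      rw [List.filter_eq_self.mpr hkeep, List.filter_eq_nil_iff.mpr hdrop]
      simp

lemma length_foldl_set (f : Nat → Int) :
    ∀ (ts : List Nat) (L : List Int),
      (ts.foldl (fun L t => L.set t (f t)) L).length = L.length := by
  intro ts
  induction ts with
  | nil => intro L; rfl
  | cons u rest ih => intro L; simp [List.foldl_cons, ih, List.length_set]

lemma getD_foldl_set (f : Nat → Int) :
    ∀ (ts : List Nat) (L : List Int) (t : Nat), t < L.length →
      (ts.foldl (fun L t => L.set t (f t)) L).getD t 0 =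
        if t ∈ ts then f t else L.getD t 0 := by
  intro ts
  induction ts with
  | nil => intro L t ht; simp
  | cons u rest ih =>
    intro L t ht
    simp only [List.foldl_cons]
    rw [ih _ _ (by simpa using ht)]
    by_cases hmem : t ∈ rest
    · simp [hmem]
    · simp only [hmem, if_false, List.mem_cons, false_or]
      by_cases he : t = u
      · subst he
        simp [List.getD_eq_getElem?_getD, List.getElem?_set, ht]
      · simp [he, List.getD_eq_getElem?_getD, List.getElem?_set_ne (fun h => he h.symm)]

lemma scanDrain_eq (x : Int) :
    ∀ (sl : List Nat) (L : List Int),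
      scanDrain x (sl.map (fun j : Nat => (j : Int))) L =
        sl.foldl (fun L t => L.set t ((t : Int) - x - 1)) L := by
  intro sl
  induction sl with
  | nil => intro L; rfl
  | cons t rest ih =>
    intro L
    simp only [List.map_cons, scanDrain, PySem.List.pySetD_natCast, List.foldl_cons]
    exact ih _

lemma stkN_mem (arr : List Int) (lo k : Nat) {j : Nat} (h : j ∈ stkN arr lo k) :
    lo ≤ j ∧ j < lo + k ∧ j - lo ≤ rLen arr j := by
  unfold stkN at h
  rcases List.mem_filter.mp h with ⟨hr, hc⟩
  rcases List.mem_range'_1.mp hr with ⟨h1, h2⟩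
  exact ⟨h1, h2, by simpa using hc⟩

lemma range'_pairwise_lt (n : Nat) : ∀ s : Nat, (List.range' s n).Pairwise (· < ·) := by
  induction n with
  | zero => intro s; simp
  | succ n ih =>
    intro s
    rw [List.range'_succ]
    exact List.Pairwise.cons (fun y hy => (List.mem_range'_1.mp hy).1) (ih (s + 1))

lemma stkN_pairwise (arr : List Int) (lo k : Nat) :
    (stkN arr lo k).Pairwise (fun p q => arr.getD q 0 < arr.getD p 0) := by
  have hlt : (stkN arr lo k).Pairwise (· < ·) :=
    (range'_pairwise_lt k lo).filter _
  refine pairwise_rel_of_mem (C := fun j => j ∈ stkN arr lo k) _ hlt (fun x hx => hx) ?_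
  intro p q hp hq hpq
  rcases stkN_mem arr lo k hp with ⟨hp1, _, _⟩
  rcases stkN_mem arr lo k hq with ⟨_, _, hq3⟩
  exact rLen_gt arr (by omega) hpq

-- the fold invariant
lemma scanA_inv (arr : List Int) :
    ∀ k, k ≤ arr.length →
      (((List.range k).map (fun m : Nat => (arr.length : Int) - 1 - (m : Int))).foldl
        (fun (s : List Int × List Int) i =>
          let p := scanPops arr i s.1 s.2
          (i :: p.1, p.2))
        ([], List.replicate arr.length (0 : Int))) =
      (((stkN arr (arr.length - k) k).map (fun j : Nat => (j : Int))),
        ((List.range arr.length).map (fun t => leftSpec arr (arr.length - k) t))) := by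
  intro k
  induction k with
  | zero =>
    intro _
    simp only [List.range_zero, List.map_nil, List.foldl_nil]
    refine Prod.ext ?_ ?_
    · simp [stkN]
    · apply List.ext_getElem
      · simp
      · intro t h1 h2
        simp only [List.length_replicate] at h1
        simp only [List.getElem_replicate, List.getElem_map, List.getElem_range]
        unfold leftSpec
        rw [if_neg (by omega)]
  | succ k ih =>
    intro hk
    have hkn : k < arr.length := by omega
    rw [List.range_succ, List.map_append, List.foldl_append, ih (by omega)]
    simp only [List.map_cons, List.map_nil, List.foldl_cons, List.foldl_nil]
    set n := arr.length with hn
    set lo := n - k with hlo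
    have hlo1 : 1 ≤ lo := by omega
    have hcast : (n : Int) - 1 - k = ((lo - 1 : Nat) : Int) := by push_cast; omega
    rw [hcast, scanPops_eq arr (lo - 1) _ _ (stkN_pairwise arr lo k)]
    have hmemlen : ∀ u ∈ (stkN arr lo k).filter
        (fun t => decide (arr.getD (lo - 1) 0 ≤ arr.getD t 0)),
        u < ((List.range n).map (fun t => leftSpec arr lo t)).length := by
      intro u hu
      rcases stkN_mem arr lo k (List.mem_of_mem_filter hu) with ⟨_, h2, _⟩
      simp; omega
    have hpair : stkN arr (n - (k + 1)) (k + 1) =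
          (lo - 1) :: (stkN arr lo k).filter
            (fun t => decide (arr.getD t 0 < arr.getD (lo - 1) 0)) := by
      have hrange : List.range' (n - (k + 1)) (k + 1) = (lo - 1) :: List.range' lo k := by
        have h1 : n - (k + 1) = lo - 1 := by omega
        have h2 : lo - 1 + 1 = lo := by omega
        rw [h1, List.range'_succ, h2]
      unfold stkN
      rw [hrange, List.filter_cons]
      have hc0 : (decide (lo - 1 - (n - (k + 1)) ≤ rLen arr (lo - 1))) = true := by
        simp; omega
      simp only [hc0, if_pos]
      congr 1
      rw [List.filter_filter]
      apply List.filter_congr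
      intro j hj
      rcases List.mem_range'_1.mp hj with ⟨h1, h2⟩
      have hiff := keep_iff arr lo j hlo1 h1
      have hsub : j - (n - (k + 1)) = j - (lo - 1) := by omega
      simp only [hsub]
      by_cases hL : j - (lo - 1) ≤ rLen arr j
      · rcases hiff.mp hL with ⟨ha, hb⟩
        have hb' : arr[j]?.getD 0 < arr[lo - 1]?.getD 0 := hb
        simp [hL, ha, hb']
      · by_cases hA : arr.getD j 0 < arr.getD (lo - 1) 0
        · have hB : ¬ j - lo ≤ rLen arr j := fun hc => hL (hiff.mpr ⟨hc, hA⟩)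
          simp [hL, hB]
        · have hA' : ¬ arr[j]?.getD 0 < arr[lo - 1]?.getD 0 := hA
          simp [hL, hA']
    refine Prod.ext ?_ ?_
    · -- stack component
      show ((lo - 1 : Nat) : Int) :: _ = _
      rw [hpair]; simp
    · -- left component
      show ((stkN arr lo k).filter (fun t => decide (arr.getD (lo - 1) 0 ≤ arr.getD t 0))).foldl
             (fun L t => L.set t ((t : Int) - ((lo - 1 : Nat) : Int) - 1))
             ((List.range n).map (fun t => leftSpec arr lo t)) = _
      apply List.ext_getElem
      · rw [length_foldl_set]; simp
      · intro t ht1 ht2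
        simp only [List.length_map, List.length_range] at ht2
        have hlen : t < ((List.range n).map (fun u => leftSpec arr lo u)).length := by simp; omega
        have hfold := getD_foldl_set (fun u => (u : Int) - ((lo - 1 : Nat) : Int) - 1)
          ((stkN arr lo k).filter (fun u => decide (arr.getD (lo - 1) 0 ≤ arr.getD u 0)))
          ((List.range n).map (fun u => leftSpec arr lo u)) t hlen
        rw [List.getD_eq_getElem?_getD, List.getElem?_eq_getElem ht1, Option.getD_some] at hfold
        rw [hfold]
        have hrhs : ((List.range n).map (fun u => leftSpec arr (n - (k + 1)) u))[t]'(by simpa using ht2) =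
            leftSpec arr (n - (k + 1)) t := by
          simp
        rw [hrhs]
        have hget : ((List.range n).map (fun u => leftSpec arr lo u)).getD t 0 = leftSpec arr lo t := by
          rw [List.getD_eq_getElem?_getD, List.getElem?_map]
          simp [List.getElem?_range ht2]
        rw [hget]
        by_cases hmem : t ∈ (stkN arr lo k).filter
            (fun u => decide (arr.getD (lo - 1) 0 ≤ arr.getD u 0))
        · rcases stkN_mem arr lo k (List.mem_of_mem_filter hmem) with ⟨h1, h2, h3⟩
          have hpop : arr.getD (lo - 1) 0 ≤ arr.getD t 0 := by
            have := (List.mem_filter.mp hmem).2; simpa using this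
          have hr : rLen arr t = t - lo := pop_r arr lo t hlo1 h1 h3 hpop
          have hcond : n - (k + 1) ≤ t ∧ rLen arr t < t - (n - (k + 1)) := by omega
          simp only [hmem, if_pos, leftSpec, hcond, and_self, if_true]
          rw [hr]; push_cast; omega
        · simp only [hmem, if_neg, if_false]
          unfold leftSpec
          by_cases hge : lo ≤ t
          · by_cases hpopd : rLen arr t < t - lo
            · have : n - (k + 1) ≤ t ∧ rLen arr t < t - (n - (k + 1)) := by omega
              simp [hpopd, hge, this]
            · have hc : t - lo ≤ rLen arr t := by omega
              have hin : t ∈ stkN arr lo k := by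
                unfold stkN
                refine List.mem_filter.mpr ⟨List.mem_range'_1.mpr ⟨hge, by omega⟩, decide_eq_true (by omega)⟩
              have hkeep : arr.getD t 0 < arr.getD (lo - 1) 0 := by
                by_contra hno
                exact hmem (List.mem_filter.mpr ⟨hin, decide_eq_true (by omega)⟩)
              have hnot : ¬ rLen arr t < t - (n - (k + 1)) := by
                have := (keep_iff arr lo t hlo1 hge).mpr ⟨hc, hkeep⟩
                omega
              simp [hpopd, hnot]
          · have h1 : ¬ (lo ≤ t ∧ rLen arr t < t - lo) := by omega
            have h2 : ¬ (n - (k + 1) ≤ t ∧ rLen arr t < t - (n - (k + 1))) := by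
              have hle := runLen_le arr (arr.getD t 0) t
              unfold rLen; omega
            simp [h1, h2]
            omega

-- B's inner while equals runLen
lemma altWhile_eq (arr : List Int) (v : Int) :
    ∀ j k, altWhile arr v (k + j) k = k + runLen arr v j := by
  intro j
  induction j with
  | zero =>
    intro k
    rw [altWhile]
    simp [runLen]
  | succ j ih =>
    intro k
    rw [altWhile]
    have hidx : ((k + (j + 1) : Nat) : Int) - 1 - k = ((j : Nat) : Int) := by push_cast; omega
    rw [hidx, PySem.List.pyGetD_natCast]
    by_cases h : v < arr.getD j 0
    · rw [if_pos ⟨by omega, h⟩]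
      have : k + (j + 1) = (k + 1) + j := by omega
      rw [this, ih (k + 1)]
      simp only [runLen, if_pos h]; omega
    · rw [if_neg (by intro hc; exact h hc.2)]
      simp only [runLen, if_neg h]
      omega

lemma alt_eq_map (arr : List Int) :
    scan_left_alt arr = (List.range arr.length).map (fun i => (rLen arr i : Int)) := by
  unfold scan_left_alt
  rw [PySem.List.pyRange_one]
  simp only [Int.sub_zero, Int.toNat_natCast]
  rw [List.foldl_map, PySem.List.foldl_append_singleton_eq_map]
  simp only [List.nil_append]
  apply List.map_congr_left
  intro i hi
  have : ((0 : Int) + i).toNat = i := by omega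
  rw [show (0 : Int) + (i : Int) = ((i : Nat) : Int) by omega]
  rw [PySem.List.pyGetD_natCast, Int.toNat_natCast]
  have h0 := altWhile_eq arr (arr.getD i 0) i 0
  simp only [Nat.zero_add] at h0
  rw [h0]
  rfl

-- ===== VERDICT (by name: the statement is the Claim_ definition above) =====
theorem scan_left_spec : Claim_equal_scan_left := by
  intro arr _ _
  unfold Spec_scan_left
  have hrange : PySem.List.pyRange ((arr.length : Int) - 1) (-1) (-1) =
      (List.range arr.length).map (fun m : Nat => (arr.length : Int) - 1 - (m : Int)) := by
    rw [PySem.List.pyRange_neg_one]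
    have : ((arr.length : Int) - 1 - (-1)).toNat = arr.length := by omega
    rw [this]
  have hbody : scan_left arr =
      scanDrain (0 - 1)
        (((PySem.List.pyRange ((arr.length : Int) - 1) (-1) (-1)).foldl
          (fun (s : List Int × List Int) i =>
            let p := scanPops arr i s.1 s.2
            (i :: p.1, p.2))
          ([], List.replicate arr.length (0 : Int))).1)
        (((PySem.List.pyRange ((arr.length : Int) - 1) (-1) (-1)).foldl
          (fun (s : List Int × List Int) i =>
            let p := scanPops arr i s.1 s.2
            (i :: p.1, p.2))
          ([], List.replicate arr.length (0 : Int))).2) := rfl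
  rw [hbody, hrange, scanA_inv arr arr.length (le_refl _)]
  simp only [Nat.sub_self]
  rw [scanDrain_eq, alt_eq_map]
  apply List.ext_getElem
  · rw [length_foldl_set]; simp
  · intro t ht1 ht2
    have hlt : t < arr.length := by simpa using ht2
    have hlen : t < ((List.range arr.length).map (fun u => leftSpec arr 0 u)).length := by
      simp; omega
    have hset := getD_foldl_set (fun u => (u : Int) - (0 - 1) - 1) (stkN arr 0 arr.length) _ t hlen
    rw [List.getD_eq_getElem?_getD, List.getElem?_eq_getElem ht1, Option.getD_some] at hset
    rw [hset]
    have hget : ((List.range arr.length).map (fun u => leftSpec arr 0 u)).getD t 0 =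
        leftSpec arr 0 t := by
      rw [List.getD_eq_getElem?_getD, List.getElem?_map]
      simp [List.getElem?_range hlt]
    rw [hget]
    have hrhs : ((List.range arr.length).map (fun i => (rLen arr i : Int)))[t]'(by
        simpa using ht2) = (rLen arr t : Int) := by simp
    rw [hrhs]
    have hle := runLen_le arr (arr.getD t 0) t
    by_cases hmem : t ∈ stkN arr 0 arr.length
    · rcases stkN_mem arr 0 arr.length hmem with ⟨_, _, h3⟩
      have hr : rLen arr t = t := by unfold rLen at *; omega
      simp only [hmem, if_pos, hr]
      omega
    · have hnotfull : ¬ (t - 0 ≤ rLen arr t) := by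
        intro hc
        exact hmem (List.mem_filter.mpr
          ⟨List.mem_range'_1.mpr ⟨by omega, by omega⟩, by simpa using hc⟩)
      simp only [hmem, if_neg, if_false, leftSpec]
      have hcnd : (0 ≤ t ∧ rLen arr t < t - 0) := by omega
      simp [hcnd]
      omega
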